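-- pv_equiv track=rewrite | github.com/mildsalmon/CodingTest-Study | 1_PS/1_python-for-coding-test/Ch12/Q14_외벽 점검.py | solution
-- ===== SOURCE A (Python) =====
-- from itertools import permutations
--
-- def solution(n, weak, dist):
--     weak_len = len(weak)
--     answer = len(dist) + 1
--     for i in range(len(weak)):
--         weak.append(weak[i] + n)
--
--     for start in range(weak_len):
--
--         for friend in list(permutations(dist, len(dist))):
--             count = 1
--             pos = weak[start] + friend[count - 1]
--             for i in range(start, start + weak_len):
--                 if pos < weak[i]:
--                     count += 1
--                     if count > len(dist):
--                         break
--                     pos = weak[i] + friend[count-1 ]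
--             answer = min(answer, count)
--     if answer > len(dist):
--         return -1
--     return answer
-- ===== SOURCE B (Python) =====
-- # Friend-centric greedy walk over insertion-generated full permutations, searched by
-- # increasing friend count k (first feasible k wins) instead of A's min-accumulation over
-- # itertools permutations with a point-centric walk.  Mutates `weak` in place (doubles the
-- # wall) exactly like the original.
-- def solution(n, weak, dist):
--     wl = len(weak)
--     weak += [x + n for x in weak]
--
--     def perms(items):
--         # all full orderings, by inserting the head into every position of each tail ordering
--         if not items:
--             return [[]]
--         out = []
--         for p in perms(items[1:]):
--             for i in range(len(p) + 1):
--                 out.append(p[:i] + [items[0]] + p[i:])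
--         return out
--
--     def covers(order, start):
--         # greedy walk, friend by friend: each friend placed at the first unreached point
--         end = start + wl
--         u = start
--         reach = weak[u] + order[0]
--         while u < end and weak[u] <= reach:
--             u += 1
--         idx = 1
--         while u < end:
--             if idx == len(order):
--                 return False
--             reach = weak[u] + order[idx]
--             idx += 1
--             u += 1  # the placement point itself counts as handled
--             while u < end and weak[u] <= reach:
--                 u += 1
--         return True
--
--     allperms = perms(dist)
--     for k in range(1, len(dist) + 1):
--         if any(covers(p[:k], start) for start in range(wl) for p in allperms):
--             return k
--     return -1
-- ===== Notes on version B (the rewrite author's own statement) =====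
-- stated objective: alternative
-- what changed: Replaces A's min-accumulation over all full itertools permutations (point-by-point walk with a running count) by an increasing-k feasibility search over insertion-generated permutations with a friend-by-friend walk that advances a pointer, returning the first feasible k; the wall-doubling mutation of weak is kept.
import Mathlib
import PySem

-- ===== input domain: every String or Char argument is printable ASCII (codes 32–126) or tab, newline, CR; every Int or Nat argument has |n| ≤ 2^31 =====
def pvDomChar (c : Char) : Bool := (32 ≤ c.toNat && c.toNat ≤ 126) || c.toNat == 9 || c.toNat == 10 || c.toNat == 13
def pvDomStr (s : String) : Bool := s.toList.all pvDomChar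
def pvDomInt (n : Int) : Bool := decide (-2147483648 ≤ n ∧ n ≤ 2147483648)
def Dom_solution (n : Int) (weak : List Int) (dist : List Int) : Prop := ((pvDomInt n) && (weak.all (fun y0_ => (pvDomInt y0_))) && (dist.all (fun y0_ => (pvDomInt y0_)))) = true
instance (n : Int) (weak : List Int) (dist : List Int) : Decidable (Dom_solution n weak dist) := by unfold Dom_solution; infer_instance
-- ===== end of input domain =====

-- B replaces A's min-over-all-itertools-permutations accumulation (point-by-point walk) by an
-- increasing-k feasibility search over insertion-generated permutations with a friend-by-friend
-- walk; both Pythons mutate `weak` the same way (the equivalence proved is about the return value).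

-- ===== PORT A =====
-- itertools.permutations dist (full length), in itertools (index-lexicographic) order.
def pyPerms : Nat → List Int → List (List Int)
  | 0, _ => [[]]
  | k+1, l => (List.range l.length).flatMap
      (fun i => (pyPerms k (l.eraseIdx i)).map (fun p => l.getD i 0 :: p))

-- A's `for i in range(len(weak)): weak.append(weak[i] + n)` doubling loop.
def doubleWall (n : Int) (weak : List Int) : List Int :=
  (List.range weak.length).foldl (fun acc i => acc ++ [acc.getD i 0 + n]) weak

-- A's inner `for i in range(start, start+weak_len)` loop; state = (count, pos); `break`
-- returns the just-incremented count.  getD is exact: every index accessed is in range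
-- whenever the Python returns.
def aLoop (w f : List Int) (m : Nat) : List Nat → Nat → Int → Nat
  | [], c, _ => c
  | i :: is, c, pos =>
    if pos < w.getD i 0 then
      if m < c + 1 then c + 1
      else aLoop w f m is (c+1) (w.getD i 0 + f.getD c 0)
    else aLoop w f m is c pos

def solution (n : Int) (weak : List Int) (dist : List Int) : Int :=
  let weak_len := weak.length
  let w := doubleWall n weak
  let m := dist.length
  let answer := (List.range weak_len).foldl (fun ans start =>
      (pyPerms m dist).foldl (fun ans f =>
          min ans (aLoop w f m (List.range' start weak_len) 1 (w.getD start 0 + f.getD 0 0))) ans)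
    (m+1)
  if m < answer then -1 else (answer : Int)

-- ===== PORT B =====
-- B's `perms`: all full orderings, inserting the head into every position of each tail ordering.
def permsIns : List Int → List (List Int)
  | [] => [[]]
  | x :: xs => (permsIns xs).flatMap
      (fun p => (List.range (p.length + 1)).map (fun i => p.take i ++ x :: p.drop i))

-- B's `while u < end and weak[u] <= reach: u += 1` (fuel = end - u).
def advB (w : List Int) (reach : Int) : Nat → Nat → Nat
  | 0, u => u
  | m+1, u => if w.getD u 0 ≤ reach then advB w reach m (u+1) else u

-- B's `while u < end:` loop over the remaining friends.
def coversGo (w : List Int) (e : Nat) : List Int → Nat → Bool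
  | [], u => decide (e ≤ u)
  | f :: fs, u =>
    if e ≤ u then true
    else coversGo w e fs (advB w (w.getD u 0 + f) (e - (u+1)) (u+1))

-- B's `covers(order, start)`; `order` is never [] where B calls it (k ≥ 1).
def coversB (w : List Int) (start wl : Nat) (order : List Int) : Bool :=
  match order with
  | [] => false
  | f0 :: fs => coversGo w (start + wl) fs (advB w (w.getD start 0 + f0) ((start + wl) - start) start)

def solution_alt (n : Int) (weak : List Int) (dist : List Int) : Int :=
  let wl := weak.length
  let w := weak ++ weak.map (fun x => x + n)
  let ps := permsIns dist
  match (List.range' 1 dist.length).find? (fun k =>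
      (List.range wl).any (fun start => ps.any (fun p => coversB w start wl (p.take k)))) with
  | some k => (k : Int)
  | none => -1

-- ===== PRECONDITION & SPEC =====
-- Pre_ excludes only dist = [] with weak ≠ [], where A raises IndexError (friend[0] on the
-- empty permutation tuple); B returns -1 there (the natural "impossible" answer).
def Pre_solution (n : Int) (weak : List Int) (dist : List Int) : Prop :=
  weak = [] ∨ dist ≠ []
instance (n : Int) (weak : List Int) (dist : List Int) : Decidable (Pre_solution n weak dist) := by
  unfold Pre_solution; infer_instance

def pvWitness_solution : Int × List Int × List Int := (10, [1, 5], [3, 2])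

def Spec_solution (n : Int) (weak : List Int) (dist : List Int) (out : Int) : Prop :=
  out = solution_alt n weak dist
instance (n : Int) (weak : List Int) (dist : List Int) (out : Int) : Decidable (Spec_solution n weak dist out) := by
  unfold Spec_solution; infer_instance

-- ===== CLAIM (what is proved, stated in full; the proofs are below) =====
def Claim_equal_solution : Prop := ∀ (n : Int) (weak : List Int) (dist : List Int), Dom_solution n weak dist → Pre_solution n weak dist → Spec_solution n weak dist (solution n weak dist)

-- ===== LEMMAS AND PROOFS =====

-- Proof-side single walk with an explicit friend budget `b`: `some c` = the walk covers all
-- points using count c ≤ b, `none` = the budget is exceeded.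
def simGo (w f : List Int) (b : Nat) : List Nat → Nat → Int → Option Nat
  | [], c, _ => some c
  | i :: is, c, pos =>
    if pos < w.getD i 0 then
      if b < c + 1 then none
      else simGo w f b is (c+1) (w.getD i 0 + f.getD c 0)
    else simGo w f b is c pos

theorem aLoop_of_some (w f : List Int) (m : Nat) (idxs : List Nat) (c : Nat) (pos : Int) (c' : Nat)
    (h : simGo w f m idxs c pos = some c') : aLoop w f m idxs c pos = c' := by
  induction idxs generalizing c pos with
  | nil => simp [simGo] at h; simp [aLoop, h]
  | cons i is ih =>
    simp only [simGo, aLoop] at *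
    split at h
    · split at h
      · exact absurd h (by simp)
      · rw [ih _ _ h]; simp_all
    · rw [ih _ _ h]; simp_all

theorem aLoop_of_none (w f : List Int) (m : Nat) (idxs : List Nat) (c : Nat) (pos : Int)
    (h : simGo w f m idxs c pos = none) : m + 1 ≤ aLoop w f m idxs c pos := by
  induction idxs generalizing c pos with
  | nil => simp [simGo] at h
  | cons i is ih =>
    simp only [simGo] at h
    simp only [aLoop]
    by_cases hp : pos < w.getD i 0
    · rw [if_pos hp] at h ⊢
      by_cases hb : m < c + 1
      · rw [if_pos hb]; omega
      · rw [if_neg hb] at h ⊢; exact ih _ _ h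
    · rw [if_neg hp] at h ⊢; exact ih _ _ h

theorem sim_mono (w f : List Int) (b : Nat) (idxs : List Nat) (c : Nat) (pos : Int) (c' : Nat)
    (h : simGo w f b idxs c pos = some c') : c ≤ c' := by
  induction idxs generalizing c pos with
  | nil => simp [simGo] at h; omega
  | cons i is ih =>
    simp only [simGo] at h
    split at h
    · split at h
      · exact absurd h (by simp)
      · have := ih _ _ h; omega
    · exact ih _ _ h

theorem sim_bound (w f : List Int) (b : Nat) (idxs : List Nat) (c : Nat) (pos : Int) (c' : Nat)
    (h : simGo w f b idxs c pos = some c') : c' = c ∨ c' ≤ b := by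
  induction idxs generalizing c pos with
  | nil => simp [simGo] at h; omega
  | cons i is ih =>
    simp only [simGo] at h
    split at h
    · split at h
      · exact absurd h (by simp)
      · rcases ih _ _ h with h1 | h1 <;> omega
    · exact ih _ _ h

theorem sim_transfer (w f f' : List Int) (b b' : Nat) (idxs : List Nat) (c : Nat) (pos : Int) (c' : Nat)
    (h : simGo w f b idxs c pos = some c') (hb : c' ≤ b')
    (hag : ∀ j, c ≤ j → j < c' → f'.getD j 0 = f.getD j 0) :
    simGo w f' b' idxs c pos = some c' := by
  induction idxs generalizing c pos with
  | nil => simpa [simGo] using h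
  | cons i is ih =>
    simp only [simGo] at h ⊢
    by_cases hp : pos < w.getD i 0
    · rw [if_pos hp] at h ⊢
      by_cases hg : b < c + 1
      · rw [if_pos hg] at h; exact absurd h (by simp)
      · rw [if_neg hg] at h
        have hc1 : c + 1 ≤ c' := sim_mono w f b is (c+1) _ c' h
        rw [if_neg (show ¬ b' < c + 1 by omega)]
        rw [hag c (le_refl c) (by omega)]
        exact ih _ _ h (fun j h1 h2 => hag j (by omega) h2)
    · rw [if_neg hp] at h ⊢
      exact ih _ _ h hag

theorem mem_pyPerms_succ (k : Nat) (l : List Int) (p : List Int) :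
    p ∈ pyPerms (k+1) l ↔ ∃ i, i < l.length ∧ ∃ q, q ∈ pyPerms k (l.eraseIdx i) ∧ p = l.getD i 0 :: q := by
  simp only [pyPerms, List.mem_flatMap, List.mem_range, List.mem_map]
  constructor
  · rintro ⟨i, hi, q, hq, rfl⟩; exact ⟨i, hi, q, hq, rfl⟩
  · rintro ⟨i, hi, q, hq, rfl⟩; exact ⟨i, hi, q, hq, rfl⟩

theorem pyPerms_take (k : Nat) (l p : List Int) (j : Nat)
    (hp : p ∈ pyPerms k l) (hj : j ≤ k) : p.take j ∈ pyPerms j l := by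
  induction k generalizing l p j with
  | zero =>
    have hj0 : j = 0 := Nat.le_zero.mp hj
    subst hj0
    simp [pyPerms] at hp ⊢
  | succ k ih =>
    rcases (mem_pyPerms_succ k l p).mp hp with ⟨i, hi, q, hq, rfl⟩
    cases j with
    | zero => simp [pyPerms]
    | succ j =>
      rw [List.take_succ_cons]
      exact (mem_pyPerms_succ j l _).mpr ⟨i, hi, q.take j, ih _ _ j hq (by omega), rfl⟩

theorem pyPerms_nonempty (k : Nat) (l : List Int) (hk : k ≤ l.length) :
    ∃ p, p ∈ pyPerms k l := by
  induction k generalizing l with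
  | zero => exact ⟨[], by simp [pyPerms]⟩
  | succ k ih =>
    have hl : 0 < l.length := by omega
    have hlen : (l.eraseIdx 0).length = l.length - 1 := by
      rw [List.length_eraseIdx]; simp [hl]
    obtain ⟨p, hp⟩ := ih (l.eraseIdx 0) (by omega)
    exact ⟨l.getD 0 0 :: p, (mem_pyPerms_succ k l _).mpr ⟨0, hl, p, hp, rfl⟩⟩

theorem pyPerms_extend (k : Nat) (l q : List Int)
    (hq : q ∈ pyPerms k l) (hk : k ≤ l.length) :
    ∃ p, p ∈ pyPerms l.length l ∧ p.take k = q := by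
  induction k generalizing l q with
  | zero =>
    simp [pyPerms] at hq
    subst hq
    obtain ⟨p, hp⟩ := pyPerms_nonempty l.length l (le_refl _)
    exact ⟨p, hp, by simp⟩
  | succ k ih =>
    rcases (mem_pyPerms_succ k l q).mp hq with ⟨i, hi, q', hq', rfl⟩
    have hlen : (l.eraseIdx i).length = l.length - 1 := by
      rw [List.length_eraseIdx]; simp [hi]
    obtain ⟨p', hp', ht⟩ := ih (l.eraseIdx i) q' hq' (by omega)
    refine ⟨l.getD i 0 :: p', ?_, ?_⟩
    · have hll : l.length = (l.eraseIdx i).length + 1 := by omega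
      rw [hll]
      exact (mem_pyPerms_succ _ l _).mpr ⟨i, hi, p', hp', rfl⟩
    · rw [List.take_succ_cons, ht]

theorem pyPerms_length (k : Nat) (l p : List Int) (hp : p ∈ pyPerms k l) : p.length = k := by
  induction k generalizing l p with
  | zero => simp [pyPerms] at hp; simp [hp]
  | succ k ih =>
    rcases (mem_pyPerms_succ k l p).mp hp with ⟨i, _, q, hq, rfl⟩
    simp [ih _ _ hq]

theorem pyPerms_full_perm (k : Nat) (l p : List Int) (hk : k = l.length)
    (hp : p ∈ pyPerms k l) : p.Perm l := by
  induction k generalizing l p with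
  | zero =>
    simp [pyPerms] at hp
    subst hp
    have : l = [] := List.eq_nil_of_length_eq_zero hk.symm
    simp [this]
  | succ k ih =>
    rcases (mem_pyPerms_succ k l p).mp hp with ⟨i, hi, q, hq, rfl⟩
    have hlen : (l.eraseIdx i).length = l.length - 1 := by
      rw [List.length_eraseIdx]; simp [hi]
    have hq' : q.Perm (l.eraseIdx i) := ih (l.eraseIdx i) q (by omega) hq
    have : l.getD i 0 = l[i] := List.getD_eq_getElem l 0 hi
    rw [this]
    exact (List.Perm.cons l[i] hq').trans (List.getElem_cons_eraseIdx_perm hi)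

theorem perm_mem_pyPerms_full (p l : List Int) (h : p.Perm l) : p ∈ pyPerms l.length l := by
  induction p generalizing l with
  | nil =>
    have : l = [] := (List.Perm.nil_eq h).symm
    subst this
    simp [pyPerms]
  | cons x p' ih =>
    have hx : x ∈ l := h.subset (List.mem_cons_self)
    obtain ⟨i, hi, hxi⟩ := List.getElem_of_mem hx
    have hperm : (x :: p').Perm (x :: l.eraseIdx i) := by
      refine h.trans ?_
      rw [← hxi]
      exact (List.getElem_cons_eraseIdx_perm hi).symm
    have hp' : p'.Perm (l.eraseIdx i) := (List.perm_cons x).mp hperm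
    have hlen : (l.eraseIdx i).length = l.length - 1 := by
      rw [List.length_eraseIdx]; simp [hi]
    have hll : l.length = (l.eraseIdx i).length + 1 := by omega
    rw [hll]
    refine (mem_pyPerms_succ _ l _).mpr ⟨i, hi, p', ih _ hp', ?_⟩
    rw [List.getD_eq_getElem l 0 hi, hxi]

-- `q.take i ++ x :: q.drop i = q.insertIdx i x` for i ≤ q.length
theorem take_cons_drop_eq_insertIdx (q : List Int) (x : Int) (i : Nat) (hi : i ≤ q.length) :
    q.take i ++ x :: q.drop i = q.insertIdx i x := by
  induction q generalizing i with
  | nil =>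
    have : i = 0 := by simpa using hi
    simp [this]
  | cons y q' ih =>
    cases i with
    | zero => simp
    | succ i =>
      simp only [List.take_succ_cons, List.drop_succ_cons, List.insertIdx_succ_cons,
        List.cons_append]
      rw [ih i (by simpa using hi)]

theorem mem_permsIns (l p : List Int) : p ∈ permsIns l ↔ p.Perm l := by
  induction l generalizing p with
  | nil => simp [permsIns, List.perm_nil]
  | cons x xs ih =>
    simp only [permsIns, List.mem_flatMap, List.mem_map, List.mem_range]
    constructor
    · rintro ⟨q, hq, i, hi, rfl⟩
      have hq' : q.Perm xs := (ih q).mp hq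
      rw [take_cons_drop_eq_insertIdx q x i (by omega)]
      refine (List.perm_insertIdx x q (by omega)).trans ?_
      exact List.Perm.cons x hq'
    · intro hp
      have hx : x ∈ p := hp.symm.subset (List.mem_cons_self)
      obtain ⟨i, hi, hxi⟩ := List.getElem_of_mem hx
      have hqlen : (p.eraseIdx i).length = p.length - 1 := by
        rw [List.length_eraseIdx]; simp [hi]
      refine ⟨p.eraseIdx i, ?_, i, by omega, ?_⟩
      · apply (ih _).mpr
        have h0 : (x :: p.eraseIdx i).Perm p := by
          rw [← hxi]
          exact List.getElem_cons_eraseIdx_perm hi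
        have h1 : (x :: p.eraseIdx i).Perm (x :: xs) := h0.trans hp
        exact (List.perm_cons x).mp h1
      · rw [take_cons_drop_eq_insertIdx _ x i (by omega), ← hxi,
          List.insertIdx_eraseIdx_getElem hi]

-- ---- advB / coversGo vs simGo ----

theorem advB_ge (w : List Int) (pos : Int) (m u : Nat) : u ≤ advB w pos m u := by
  induction m generalizing u with
  | zero => simp [advB]
  | succ m ih =>
    simp only [advB]
    split
    · have := ih (u+1); omega
    · omega

theorem advB_le (w : List Int) (pos : Int) (m u : Nat) : advB w pos m u ≤ u + m := by
  induction m generalizing u with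
  | zero => simp [advB]
  | succ m ih =>
    simp only [advB]
    split
    · have := ih (u+1); omega
    · omega

theorem advB_stuck (w : List Int) (pos : Int) (m u : Nat)
    (h : advB w pos m u < u + m) : pos < w.getD (advB w pos m u) 0 := by
  induction m generalizing u with
  | zero => simp [advB] at h
  | succ m ih =>
    simp only [advB] at h ⊢
    by_cases hle : w.getD u 0 ≤ pos
    · rw [if_pos hle] at h ⊢
      exact ih (u+1) (by omega)
    · rw [if_neg hle] at h ⊢
      omega

theorem simGo_advB (w f : List Int) (b : Nat) (m u : Nat) (c : Nat) (pos : Int) :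
    simGo w f b (List.range' u m) c pos
      = simGo w f b (List.range' (advB w pos m u) (u + m - advB w pos m u)) c pos := by
  induction m generalizing u with
  | zero => simp [advB]
  | succ m ih =>
    simp only [advB]
    by_cases hle : w.getD u 0 ≤ pos
    · rw [if_pos hle, List.range'_succ]
      simp only [simGo, if_neg (show ¬ pos < w.getD u 0 by omega)]
      rw [ih (u+1),
        show u + (m+1) - advB w pos m (u+1) = (u+1) + m - advB w pos m (u+1) by omega]
    · rw [if_neg hle, show u + (m+1) - u = m + 1 by omega]

theorem coversGo_eq (w : List Int) (e : Nat) (fs f : List Int) (c u : Nat) (pos : Int)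
    (hfs : fs = f.drop c) (hc : c ≤ f.length) (hu : u ≤ e)
    (hstuck : u = e ∨ pos < w.getD u 0) :
    coversGo w e fs u = (simGo w f f.length (List.range' u (e - u)) c pos).isSome := by
  induction fs generalizing c u pos with
  | nil =>
    have hcf : c = f.length := by
      have := congrArg List.length hfs
      simp [List.length_drop] at this
      omega
    rcases hstuck with rfl | hpos
    · simp [coversGo, simGo]
    · rcases Nat.lt_or_ge u e with hlt | hge
      · have hrange : List.range' u (e - u) = u :: List.range' (u+1) (e - (u+1)) := by
          rw [show e - u = (e - (u+1)) + 1 by omega]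
          simp [List.range'_succ]
        rw [hrange]
        simp only [simGo, if_pos hpos, if_pos (show f.length < c + 1 by omega)]
        simp [coversGo, show ¬ e ≤ u by omega]
      · have hue : u = e := by omega
        subst hue
        simp [coversGo, simGo]
  | cons g fs' ih =>
    have hclt : c < f.length := by
      by_contra hge
      rw [List.drop_eq_nil_of_le (by omega)] at hfs
      simp at hfs
    have hg : f.getD c 0 = g := by
      have h2 : (f.drop c)[0]? = some g := by rw [← hfs]; rfl
      rw [List.getElem?_drop] at h2
      simp only [Nat.add_zero] at h2
      simp [List.getD, h2]
    have hfs' : fs' = f.drop (c+1) := by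
      have h3 := congrArg (List.drop 1) hfs
      simp only [List.drop_succ_cons, List.drop_zero, List.drop_drop] at h3
      simpa [Nat.add_comm] using h3
    rcases hstuck with rfl | hpos
    · simp [coversGo, simGo]
    · rcases Nat.lt_or_ge u e with hlt | hge
      · have hrange : List.range' u (e - u) = u :: List.range' (u+1) (e - (u+1)) := by
          rw [show e - u = (e - (u+1)) + 1 by omega]
          simp [List.range'_succ]
        rw [hrange]
        simp only [coversGo, simGo, if_neg (show ¬ e ≤ u by omega), if_pos hpos,
          if_neg (show ¬ f.length < c + 1 by omega)]
        set pos' := w.getD u 0 + f.getD c 0 with hpos'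
        have hskip := simGo_advB w f f.length (e - (u+1)) (u+1) (c+1) pos'
        set u' := advB w pos' (e - (u+1)) (u+1) with hu'
        have hge' : u + 1 ≤ u' := advB_ge w pos' _ _
        have hle' : u' ≤ (u+1) + (e - (u+1)) := advB_le w pos' _ _
        have hu'e : u' ≤ e := by omega
        have harith : (u+1) + (e - (u+1)) - u' = e - u' := by omega
        rw [hskip, harith]
        have hstuck' : u' = e ∨ pos' < w.getD u' 0 := by
          rcases Nat.lt_or_ge u' e with h' | h'
          · right
            exact advB_stuck w pos' (e - (u+1)) (u+1) (by omega)
          · left; omega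
        rw [← hg]
        exact ih (c+1) u' pos' hfs' (by omega) hu'e hstuck'
      · have hue : u = e := by omega
        subst hue
        simp [coversGo, simGo]

theorem coversB_eq (w : List Int) (start wl : Nat) (order : List Int) (hne : order ≠ []) :
    coversB w start wl order
      = (simGo w order order.length (List.range' start wl) 1
          (w.getD start 0 + order.getD 0 0)).isSome := by
  match order, hne with
  | f0 :: fs, _ =>
    simp only [coversB, List.getD_cons_zero,
      show start + wl - start = wl from by omega]
    rw [simGo_advB w (f0 :: fs) (f0 :: fs).length wl start 1 (w.getD start 0 + f0)]
    set pos0 := w.getD start 0 + f0 with hpos0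
    set u' := advB w pos0 wl start with hu'
    have hge' : start ≤ u' := advB_ge w pos0 _ _
    have hle' : u' ≤ start + wl := advB_le w pos0 _ _
    have hstuck' : u' = start + wl ∨ pos0 < w.getD u' 0 := by
      rcases Nat.lt_or_ge u' (start + wl) with h' | h'
      · right; exact advB_stuck w pos0 wl start h'
      · left; omega
    exact coversGo_eq w (start + wl) fs (f0 :: fs) 1 u' pos0 (by simp) (by simp) (by omega) hstuck'

-- ---- the feasibility predicates ----

theorem predB_iff (w dist : List Int) (wl k : Nat) (hk1 : 1 ≤ k) (hkd : k ≤ dist.length) :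
    ((List.range wl).any (fun start => (permsIns dist).any (fun p => coversB w start wl (p.take k))) = true)
      ↔ ∃ start, start < wl ∧ ∃ q, q ∈ pyPerms k dist ∧
          (simGo w q k (List.range' start wl) 1 (w.getD start 0 + q.getD 0 0)).isSome = true := by
  simp only [List.any_eq_true, List.mem_range]
  constructor
  · rintro ⟨start, hstart, p, hp, hcov⟩
    have hperm : p.Perm dist := (mem_permsIns dist p).mp hp
    have hfull : p ∈ pyPerms dist.length dist := perm_mem_pyPerms_full p dist hperm
    have hq : p.take k ∈ pyPerms k dist := pyPerms_take dist.length dist p k hfull hkd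
    have hlen : (p.take k).length = k := pyPerms_length k dist _ hq
    have hne : p.take k ≠ [] := by
      intro h; rw [h] at hlen; simp at hlen; omega
    refine ⟨start, hstart, p.take k, hq, ?_⟩
    rw [coversB_eq w start wl _ hne, hlen] at hcov
    exact hcov
  · rintro ⟨start, hstart, q, hq, hsim⟩
    obtain ⟨p, hp, htake⟩ := pyPerms_extend k dist q hq hkd
    have hperm : p.Perm dist := pyPerms_full_perm dist.length dist p rfl hp
    have hlen : q.length = k := pyPerms_length k dist q hq
    have hne : q ≠ [] := by
      intro h; rw [h] at hlen; simp at hlen; omega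
    refine ⟨start, hstart, p, (mem_permsIns dist p).mpr hperm, ?_⟩
    rw [htake, coversB_eq w start wl q hne, hlen]
    exact hsim

-- ---- min-fold helpers (A side) ----

theorem foldl_min_le_init (l : List Nat) (a : Nat) : l.foldl min a ≤ a := by
  induction l generalizing a with
  | nil => simp
  | cons x l ih => exact le_trans (ih (min a x)) (min_le_left a x)

theorem foldl_min_le_mem (l : List Nat) (a x : Nat) (hx : x ∈ l) : l.foldl min a ≤ x := by
  induction l generalizing a with
  | nil => simp at hx
  | cons y l ih =>
    rcases List.mem_cons.mp hx with rfl | hx'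
    · exact le_trans (foldl_min_le_init l (min a x)) (min_le_right a x)
    · exact ih (min a y) hx'

theorem foldl_min_cases (l : List Nat) (a : Nat) : l.foldl min a = a ∨ l.foldl min a ∈ l := by
  induction l generalizing a with
  | nil => left; rfl
  | cons y l ih =>
    rcases ih (min a y) with h | h
    · rcases le_total a y with h' | h'
      · left; rw [List.foldl_cons, h]; exact min_eq_left h'
      · right; rw [List.foldl_cons, h]
        rw [min_eq_right h']
        exact List.mem_cons_self
    · right
      rw [List.foldl_cons]
      exact List.mem_cons_of_mem y h

theorem foldl_foldl_min {α β : Type} (L : List α) (G : α → List β) (h : α → β → Nat) (a0 : Nat) :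
    L.foldl (fun a x => (G x).foldl (fun a' y => min a' (h x y)) a) a0
      = (L.flatMap (fun x => (G x).map (h x))).foldl min a0 := by
  induction L generalizing a0 with
  | nil => simp
  | cons x L ih =>
    simp only [List.foldl_cons, List.flatMap_cons, List.foldl_append]
    rw [ih, List.foldl_map]

theorem find?_range'_before (p : Nat → Bool) (a len k : Nat)
    (h : (List.range' a len).find? p = some k) : ∀ j, a ≤ j → j < k → p j = false := by
  induction len generalizing a with
  | zero => simp at h
  | succ len ih =>
    rw [List.range'_succ] at h
    by_cases hpa : p a
    · rw [List.find?_cons_of_pos hpa] at h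
      intro j hj1 hj2
      simp at h
      omega
    · rw [List.find?_cons_of_neg hpa] at h
      intro j hj1 hj2
      rcases Nat.eq_or_lt_of_le hj1 with rfl | h'
      · simpa using hpa
      · exact ih (a+1) h j h' hj2

theorem getD_of_take_eq (p q : List Int) (k j : Nat) (h : p.take k = q) (hj : j < k) :
    p.getD j 0 = q.getD j 0 := by
  subst h
  simp [List.getD, hj]

-- ---- the doubled wall ----

theorem doubleWall_eq (n : Int) (weak : List Int) :
    doubleWall n weak = weak ++ weak.map (fun x => x + n) := by
  have key : ∀ j, j ≤ weak.length →
      (List.range j).foldl (fun acc i => acc ++ [acc.getD i 0 + n]) weak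
        = weak ++ (weak.take j).map (fun x => x + n) := by
    intro j hj
    induction j with
    | zero => simp
    | succ j ih =>
      rw [List.range_succ, List.foldl_append, ih (by omega)]
      have hjlt : j < weak.length := by omega
      have hget : (weak ++ (weak.take j).map (fun x => x + n)).getD j 0 = weak[j] := by
        simp [List.getD, List.getElem?_append_left hjlt, List.getElem?_eq_getElem hjlt]
      have htake : weak.take (j+1) = weak.take j ++ [weak[j]] := by
        rw [List.take_add_one, List.getElem?_eq_getElem hjlt]
        simp
      simp only [List.foldl_cons, List.foldl_nil, hget, htake, List.map_append]
      simp
  unfold doubleWall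
  rw [key weak.length (le_refl _), List.take_length]

-- ---- the core equivalence ----

theorem core_equiv (w dist : List Int) (wl : Nat) (hpre : wl = 0 ∨ dist ≠ []) :
    (if dist.length <
        (List.range wl).foldl (fun ans start =>
          (pyPerms dist.length dist).foldl (fun ans f =>
            min ans (aLoop w f dist.length (List.range' start wl) 1 (w.getD start 0 + f.getD 0 0))) ans)
          (dist.length + 1)
      then (-1 : Int)
      else (((List.range wl).foldl (fun ans start =>
          (pyPerms dist.length dist).foldl (fun ans f =>
            min ans (aLoop w f dist.length (List.range' start wl) 1 (w.getD start 0 + f.getD 0 0))) ans)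
          (dist.length + 1) : Nat) : Int))
    = match (List.range' 1 dist.length).find? (fun k =>
        (List.range wl).any (fun start =>
          (permsIns dist).any (fun p => coversB w start wl (p.take k)))) with
      | some k => (k : Int)
      | none => -1 := by
  rw [foldl_foldl_min (List.range wl) (fun _ => pyPerms dist.length dist)
      (fun start f => aLoop w f dist.length (List.range' start wl) 1 (w.getD start 0 + f.getD 0 0))
      (dist.length + 1)]
  set m := dist.length with hm
  set counts := (List.range wl).flatMap (fun start =>
    (pyPerms m dist).map (fun f =>
      aLoop w f m (List.range' start wl) 1 (w.getD start 0 + f.getD 0 0))) with hcounts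
  set pred := (fun k => (List.range wl).any (fun start =>
      (permsIns dist).any (fun p => coversB w start wl (p.take k)))) with hpreddef
  have hm1of : 0 < wl → 1 ≤ m := by
    intro hwl
    rcases hpre with h0 | hne
    · omega
    · have : dist.length ≠ 0 := fun h => hne (List.eq_nil_of_length_eq_zero h)
      omega
  -- every produced count is either ≥ m+1 (friend budget exceeded) or a feasible k
  have feas : ∀ x ∈ counts, m + 1 ≤ x ∨ (1 ≤ x ∧ x ≤ m ∧ pred x = true) := by
    intro x hx
    rw [hcounts] at hx
    simp only [List.mem_flatMap, List.mem_map, List.mem_range] at hx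
    obtain ⟨start, hstart, f, hf, rfl⟩ := hx
    cases hsim : simGo w f m (List.range' start wl) 1 (w.getD start 0 + f.getD 0 0) with
    | none => exact Or.inl (aLoop_of_none w f m _ 1 _ hsim)
    | some c =>
      rw [aLoop_of_some w f m _ 1 _ c hsim]
      have hc1 : 1 ≤ c := sim_mono w f m _ 1 _ c hsim
      have hm1 : 1 ≤ m := hm1of (by omega)
      have hcm : c ≤ m := by rcases sim_bound w f m _ 1 _ c hsim with h | h <;> omega
      refine Or.inr ⟨hc1, hcm, ?_⟩
      have htake : f.take c ∈ pyPerms c dist := pyPerms_take m dist f c hf hcm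
      have hsim2 : simGo w (f.take c) c (List.range' start wl) 1 (w.getD start 0 + f.getD 0 0) = some c :=
        sim_transfer w f (f.take c) m c _ 1 _ c hsim (le_refl c)
          (fun j _ hj => (getD_of_take_eq f (f.take c) c j rfl hj).symm)
      have hpos0 : (f.take c).getD 0 0 = f.getD 0 0 := (getD_of_take_eq f (f.take c) c 0 rfl hc1).symm
      rw [hpreddef]
      apply (predB_iff w dist wl c hc1 hcm).mpr
      refine ⟨start, hstart, f.take c, htake, ?_⟩
      rw [hpos0, hsim2]
      rfl
  -- every feasible k is witnessed by a count ≤ k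
  have exist_le : ∀ k, pred k = true → 1 ≤ k → k ≤ m → ∃ x ∈ counts, x ≤ k := by
    intro k hpk hk1 hkm
    rw [hpreddef] at hpk
    obtain ⟨start, hstart, q, hq, hb⟩ := (predB_iff w dist wl k hk1 hkm).mp hpk
    obtain ⟨c, hsim⟩ := Option.isSome_iff_exists.mp hb
    have hc1 : 1 ≤ c := sim_mono w q k _ 1 _ c hsim
    have hck : c ≤ k := by rcases sim_bound w q k _ 1 _ c hsim with h | h <;> omega
    obtain ⟨p, hp, ht⟩ := pyPerms_extend k dist q hq (by omega)
    have hsimp' : simGo w p m (List.range' start wl) 1 (w.getD start 0 + q.getD 0 0) = some c :=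
      sim_transfer w q p k m _ 1 _ c hsim (by omega)
        (fun j _ hj => getD_of_take_eq p q k j ht (by omega))
    have hpos0 : p.getD 0 0 = q.getD 0 0 := getD_of_take_eq p q k 0 ht (by omega)
    have haL : aLoop w p m (List.range' start wl) 1 (w.getD start 0 + p.getD 0 0) = c := by
      rw [hpos0]
      exact aLoop_of_some w p m _ 1 _ c hsimp'
    refine ⟨c, ?_, by omega⟩
    rw [hcounts]
    simp only [List.mem_flatMap, List.mem_map, List.mem_range]
    exact ⟨start, hstart, p, hp, haL⟩
  cases hfind : (List.range' 1 m).find? pred with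
  | none =>
    have hall := List.find?_eq_none.mp hfind
    have hge : m + 1 ≤ counts.foldl min (m+1) := by
      rcases foldl_min_cases counts (m+1) with h | h
      · rw [h]
      · rcases feas _ h with h1 | ⟨h1, h2, h3⟩
        · exact h1
        · have hmem : counts.foldl min (m+1) ∈ List.range' 1 m := by
            rw [List.mem_range'_1]
            omega
          exact absurd h3 (by simpa using hall _ hmem)
    rw [if_pos (by omega)]
  | some k₀ =>
    have hk₀mem := List.mem_range'_1.mp (List.mem_of_find?_eq_some hfind)
    have hpk₀ : pred k₀ = true := List.find?_some hfind
    have hle : counts.foldl min (m+1) ≤ k₀ := by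
      obtain ⟨x, hx, hxk⟩ := exist_le k₀ hpk₀ (by omega) (by omega)
      exact le_trans (foldl_min_le_mem counts (m+1) x hx) hxk
    have hge : k₀ ≤ counts.foldl min (m+1) := by
      rcases foldl_min_cases counts (m+1) with h | h
      · omega
      · rcases feas _ h with h1 | ⟨h1, h2, h3⟩
        · omega
        · by_contra hlt
          have := find?_range'_before pred 1 m k₀ hfind (counts.foldl min (m+1)) h1 (by omega)
          rw [h3] at this
          exact absurd this (by simp)
    have hansk : counts.foldl min (m+1) = k₀ := le_antisymm hle hge
    rw [if_neg (by omega), hansk]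

theorem main_equiv (n : Int) (weak dist : List Int) (hpre : weak = [] ∨ dist ≠ []) :
    solution n weak dist = solution_alt n weak dist := by
  have h' : weak.length = 0 ∨ dist ≠ [] := by
    rcases hpre with h | h
    · left; rw [h]; rfl
    · right; exact h
  simp only [solution, solution_alt]
  rw [doubleWall_eq]
  exact core_equiv (weak ++ weak.map (fun x => x + n)) dist weak.length h'

-- ===== VERDICT (by name: the statement is the Claim_ definition above) =====
theorem solution_spec : Claim_equal_solution := by
  intro n weak dist _ hpre
  unfold Spec_solution
  exact main_equiv n weak dist hpre
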